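-- pv_equiv track=rewrite | github.com/wtalioy/ChainBench | scripts/stage5/cli.py | summarize_duplicates
-- ===== SOURCE A (Python) =====
-- from collections import Counter
-- from typing import Any
--
-- def summarize_duplicates(rows: list[dict[str, Any]]) -> dict[str, Any]:
--     sample_id_counts = Counter(row["sample_id"] for row in rows)
--     audio_path_counts = Counter(row["audio_path"] for row in rows)
--     duplicate_sample_ids = {key: count for key, count in sample_id_counts.items() if count > 1}
--     duplicate_audio_paths = {key: count for key, count in audio_path_counts.items() if count > 1}
--     return {
--         "duplicate_sample_id_count": len(duplicate_sample_ids),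
--         "duplicate_audio_path_count": len(duplicate_audio_paths),
--     }
-- ===== SOURCE B (Python) =====
-- def summarize_duplicates(rows):
--     seen_sample, dup_sample = set(), set()
--     seen_audio, dup_audio = set(), set()
--     for row in rows:
--         sid = row["sample_id"]
--         ap = row["audio_path"]
--         if sid in seen_sample:
--             dup_sample.add(sid)
--         else:
--             seen_sample.add(sid)
--         if ap in seen_audio:
--             dup_audio.add(ap)
--         else:
--             seen_audio.add(ap)
--     return {
--         "duplicate_sample_id_count": len(dup_sample),
--         "duplicate_audio_path_count": len(dup_audio),
--     }
-- ===== Notes on version B (the rewrite author's own statement) =====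
-- stated objective: simpler
-- what changed: Replaces the two Counter frequency tables plus two filtering dict comprehensions by one fused pass over rows that maintains seen/duplicate sets and keeps no counts at all.
import Mathlib
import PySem

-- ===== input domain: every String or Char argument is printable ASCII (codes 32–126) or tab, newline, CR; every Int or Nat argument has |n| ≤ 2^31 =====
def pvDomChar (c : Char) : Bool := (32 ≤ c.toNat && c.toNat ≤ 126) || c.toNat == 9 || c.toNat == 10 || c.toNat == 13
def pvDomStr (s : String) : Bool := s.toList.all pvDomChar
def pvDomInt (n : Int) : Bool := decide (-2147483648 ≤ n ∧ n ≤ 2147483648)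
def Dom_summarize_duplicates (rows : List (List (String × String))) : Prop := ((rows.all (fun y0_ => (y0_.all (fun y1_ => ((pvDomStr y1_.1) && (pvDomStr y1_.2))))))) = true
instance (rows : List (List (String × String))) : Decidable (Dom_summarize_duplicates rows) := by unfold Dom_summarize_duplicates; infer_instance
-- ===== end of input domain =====

-- B replaces A's two Counter tables and filtering comprehensions by one fused pass keeping seen/duplicate sets (no counts); same return value.


-- row["k"] on the dict row: first-match lookup ("" only reached outside Pre_, where Python raises KeyError)
def pyRowGet (row : List (String × String)) (k : String) : String :=
  (PySem.Dict.mk row).getD k ""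

-- ===== PORT A =====
def summarize_duplicates (rows : List (List (String × String))) : List (String × Int) :=
  let sample_id_counts := PySem.Dict.counter (rows.map (fun row => pyRowGet row "sample_id"))
  let audio_path_counts := PySem.Dict.counter (rows.map (fun row => pyRowGet row "audio_path"))
  let duplicate_sample_ids := sample_id_counts.items.filter (fun p => decide (1 < p.2))
  let duplicate_audio_paths := audio_path_counts.items.filter (fun p => decide (1 < p.2))
  [("duplicate_sample_id_count", (duplicate_sample_ids.length : Int)),
   ("duplicate_audio_path_count", (duplicate_audio_paths.length : Int))]

-- ===== PORT B =====
-- one row's effect on a (seen, dup) pair of sets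
def dupStep (sd : PySem.Set String × PySem.Set String) (x : String) :
    PySem.Set String × PySem.Set String :=
  if PySem.Set.contains sd.1 x then (sd.1, PySem.Set.add sd.2 x)
  else (PySem.Set.add sd.1 x, sd.2)

def summarize_duplicates_alt (rows : List (List (String × String))) : List (String × Int) :=
  let st := rows.foldl
    (fun st row =>
      (dupStep st.1 (pyRowGet row "sample_id"), dupStep st.2 (pyRowGet row "audio_path")))
    ((PySem.Set.empty, PySem.Set.empty), (PySem.Set.empty, PySem.Set.empty))
  [("duplicate_sample_id_count", PySem.Set.len st.1.2),
   ("duplicate_audio_path_count", PySem.Set.len st.2.2)]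

-- ===== PRECONDITION & SPEC =====
-- Pre_ excludes rows missing a "sample_id" or "audio_path" key: both A and B raise KeyError there.
def Pre_summarize_duplicates (rows : List (List (String × String))) : Prop :=
  (rows.all (fun row =>
    (PySem.Dict.mk row).contains "sample_id" && (PySem.Dict.mk row).contains "audio_path")) = true
instance (rows : List (List (String × String))) : Decidable (Pre_summarize_duplicates rows) := by
  unfold Pre_summarize_duplicates; infer_instance

def pvWitness_summarize_duplicates : (List (List (String × String))) :=
  [[("sample_id", "s1"), ("audio_path", "p1")], [("sample_id", "s1"), ("audio_path", "p2")]]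

def Spec_summarize_duplicates (rows : List (List (String × String))) (out : List (String × Int)) : Prop := out = summarize_duplicates_alt rows
instance (rows : List (List (String × String))) (out : List (String × Int)) : Decidable (Spec_summarize_duplicates rows out) := by unfold Spec_summarize_duplicates; infer_instance

-- ===== CLAIM (what is proved, stated in full; the proofs are below) =====
def Claim_equal_summarize_duplicates : Prop := ∀ (rows : List (List (String × String))), Dom_summarize_duplicates rows → Pre_summarize_duplicates rows → Spec_summarize_duplicates rows (summarize_duplicates rows)

-- ===== LEMMAS AND PROOFS =====

-- membership in the dup component of B's fold
lemma dup_mem (xs : List String) (seen dup : PySem.Set String) (y : String) :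
    y ∈ (xs.foldl dupStep (seen, dup)).2 ↔
      y ∈ dup ∨ (y ∈ xs ∧ y ∈ seen) ∨ 2 ≤ xs.count y := by
  induction xs generalizing seen dup with
  | nil => simp
  | cons x xs ih =>
    simp only [List.foldl_cons]
    rw [show dupStep (seen, dup) x =
        (if PySem.Set.contains seen x then (seen, PySem.Set.add dup x)
         else (PySem.Set.add seen x, dup)) from rfl]
    by_cases hx : x ∈ seen
    · rw [if_pos (by simpa [PySem.Set.contains]), ih, PySem.Set.mem_add]
      by_cases hyx : y = x
      · subst hyx
        rw [List.count_cons_self]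
        constructor <;> intro _
        · exact Or.inr (Or.inl ⟨by simp, hx⟩)
        · exact Or.inl (Or.inr rfl)
      · rw [List.count_cons_of_ne (fun h => hyx h.symm), List.mem_cons]
        tauto
    · rw [if_neg (by simpa [PySem.Set.contains]), ih, PySem.Set.mem_add, List.mem_cons]
      by_cases hyx : y = x
      · subst hyx
        rw [List.count_cons_self]
        have hc := @List.count_pos_iff _ _ _ y xs
        constructor
        · rintro (h | ⟨hm, _⟩ | h)
          · exact Or.inl h
          · exact Or.inr (Or.inr (by have := hc.mpr hm; omega))
          · exact Or.inr (Or.inr (by omega))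
        · rintro (h | ⟨_, hs⟩ | h)
          · exact Or.inl h
          · exact (hx hs).elim
          · exact Or.inr (Or.inl ⟨hc.mp (by omega), Or.inr rfl⟩)
      · rw [List.count_cons_of_ne (fun h => hyx h.symm)]
        tauto

-- the dup component stays duplicate-free
lemma dup_nodup (xs : List String) (seen dup : PySem.Set String) (h : dup.Nodup) :
    (xs.foldl dupStep (seen, dup)).2.Nodup := by
  induction xs generalizing seen dup with
  | nil => simpa
  | cons x xs ih =>
    simp only [List.foldl_cons]
    rw [show dupStep (seen, dup) x =
        (if PySem.Set.contains seen x then (seen, PySem.Set.add dup x)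
         else (PySem.Set.add seen x, dup)) from rfl]
    split_ifs with hx
    · exact ih _ _ (PySem.Set.nodup_add dup x h)
    · exact ih _ _ h

-- B's duplicate-set size equals the number of distinct elements of xs occurring more than once
lemma dup_len (xs : List String) :
    (((xs.foldl dupStep (PySem.Set.empty, PySem.Set.empty)).2).length : Int) =
      (((PySem.Set.ofList xs).filter (fun k => decide ((1 : Int) < (xs.count k : Int)))).length : Int) := by
  congr 1
  apply List.Perm.length_eq
  rw [List.perm_ext_iff_of_nodup (dup_nodup xs _ _ (by simp [PySem.Set.empty]))
      ((PySem.Set.nodup_ofList xs).filter _)]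
  intro y
  rw [dup_mem]
  simp only [List.mem_filter, PySem.Set.mem_ofList, PySem.Set.empty, List.not_mem_nil,
    false_or, decide_eq_true_eq]
  constructor
  · intro h
    have h2 : 2 ≤ xs.count y := by tauto
    have hmem : y ∈ xs := List.count_pos_iff.mp (by omega)
    refine ⟨hmem, ?_⟩
    exact_mod_cast (by omega : (1 : Int) < ((xs.count y : Nat) : Int))
  · rintro ⟨_, h⟩
    have h2 : 1 < xs.count y := by exact_mod_cast h
    right; omega

-- A's filtered-items length is the same quantity
lemma counter_len (xs : List String) :
    ((((PySem.Dict.counter xs).items.filter (fun p => decide ((1 : Int) < p.2))).length : Int)) =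
      (((PySem.Set.ofList xs).filter (fun k => decide ((1 : Int) < (xs.count k : Int)))).length : Int) := by
  rw [PySem.Dict.items_counter, List.filter_map, List.length_map]
  simp [Function.comp_def]

-- ===== VERDICT (by name: the statement is the Claim_ definition above) =====
theorem summarize_duplicates_spec : Claim_equal_summarize_duplicates := by
  intro rows _ _
  show summarize_duplicates rows = summarize_duplicates_alt rows
  simp only [summarize_duplicates, summarize_duplicates_alt]
  rw [PySem.List.foldl_prod_mk
    (f := fun st row => dupStep st (pyRowGet row "sample_id"))
    (g := fun st row => dupStep st (pyRowGet row "audio_path"))]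
  rw [← List.foldl_map (f := fun row => pyRowGet row "sample_id") (g := dupStep) (l := rows),
      ← List.foldl_map (f := fun row => pyRowGet row "audio_path") (g := dupStep) (l := rows)]
  simp only [PySem.Set.len]
  rw [dup_len (rows.map (fun row => pyRowGet row "sample_id")),
      dup_len (rows.map (fun row => pyRowGet row "audio_path")),
      counter_len (rows.map (fun row => pyRowGet row "sample_id")),
      counter_len (rows.map (fun row => pyRowGet row "audio_path"))]
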